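-- pv_equiv track=rewrite | github.com/June0619/dingorithm | programmers/문자열 압축.py | solution
-- ===== SOURCE A (Python) =====
-- def solution(string):
--     max_rate = len(string) // 2
--
--     results = {}
--     for i in range(1, max_rate + 1):
--         arr = [string[j:j+i] for j in range(0, len(string), i)]
--
--         temp = None
--         compressed_cnt = 0
--         continue_cnt= 0
--         compressed_flag = False
--         for c in arr:
--             if temp == c:
--                 if not compressed_flag:
--                     compressed_flag = True
--                 continue_cnt += 1
--                 compressed_cnt += len(c)
--             else:
--                 if compressed_flag:
--                     compressed_flag = False
--                     compressed_cnt -= len(str(continue_cnt+1))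
--                     continue_cnt = 0
--
--             temp = c
--         else:
--             if compressed_flag:
--                 compressed_cnt -= len(str(continue_cnt+1))
--                 continue_cnt = 0
--
--         results[i] = compressed_cnt
--
--     max_compressed = 0
--     for i in results.values():
--         max_compressed = max(max_compressed, i)
--
--     return len(string) - max_compressed
-- ===== SOURCE B (Python) =====
-- def solution(string):
--     n = len(string)
--     best = n
--     for size in range(1, n // 2 + 1):
--         chunks = [string[j:j+size] for j in range(0, n, size)]
--         total = 0
--         while chunks:
--             head = chunks[0]
--             k = 1
--             while k < len(chunks) and chunks[k] == head:
--                 k += 1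
--             total += len(head) + (len(str(k)) if k > 1 else 0)
--             chunks = chunks[k:]
--         best = min(best, total)
--     return best
-- ===== Notes on version B (the rewrite author's own statement) =====
-- stated objective: simpler
-- what changed: B computes each chunking's compressed length directly by peeling maximal runs of equal chunks in one scan and takes the minimum, instead of A's per-chunk state machine (temp/compressed_flag/continue_cnt with a for-else fixup) that accumulates savings into a dict and subtracts the max from the length.
import Mathlib
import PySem

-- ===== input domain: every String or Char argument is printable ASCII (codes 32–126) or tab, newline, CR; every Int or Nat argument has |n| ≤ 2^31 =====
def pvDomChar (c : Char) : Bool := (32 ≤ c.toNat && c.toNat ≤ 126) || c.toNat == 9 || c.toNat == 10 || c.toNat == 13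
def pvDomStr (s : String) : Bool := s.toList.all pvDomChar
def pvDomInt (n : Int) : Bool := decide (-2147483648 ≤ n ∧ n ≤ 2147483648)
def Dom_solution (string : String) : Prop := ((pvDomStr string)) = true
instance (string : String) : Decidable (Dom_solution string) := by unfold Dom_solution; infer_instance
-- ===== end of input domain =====

-- B computes each chunking's compressed length directly with a run-peeling scan and takes the
-- minimum, replacing A's savings-counting state machine (flag/for-else) and dict; objective: simpler.

-- len(str(k)) — shared by both Pythons
def dg (k : Int) : Int := ((PySem.Int.toChars k).length : Int)

-- [string[j:j+i] for j in range(0, len(string), i)] — the comprehension both Pythons contain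
def pyChunks (s : List Char) (i : Int) : List (List Char) :=
  (PySem.List.pyRange 0 (s.length : Int) i).map
    (fun j => PySem.List.slice s (some j) (some (j + i)))

-- ===== PORT A =====
-- state: (temp, compressed_cnt, continue_cnt, compressed_flag); body of A's inner for-loop
def stepA (st : Option (List Char) × Int × Int × Bool) (c : List Char) :
    Option (List Char) × Int × Int × Bool :=
  if st.1 == some c then
    (some c, st.2.1 + (c.length : Int), st.2.2.1 + 1, true)
  else if st.2.2.2 then
    (some c, st.2.1 - dg (st.2.2.1 + 1), 0, false)
  else
    (some c, st.2.1, st.2.2.1, st.2.2.2)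

-- A's for-else clause
def finishA (st : Option (List Char) × Int × Int × Bool) : Int :=
  if st.2.2.2 then st.2.1 - dg (st.2.2.1 + 1) else st.2.1

def solution (string : String) : Int :=
  let s := string.toList
  let maxRate := PySem.Int.floordiv (s.length : Int) 2
  let results :=
    (PySem.List.pyRange 1 (maxRate + 1) 1).foldl
      (fun res i =>
        res.insert i (finishA ((pyChunks s i).foldl stepA (none, (0 : Int), (0 : Int), false))))
      (PySem.Dict.empty : PySem.Dict Int Int)
  let maxCompressed := (PySem.Dict.values results).foldl (fun m v => max m v) 0
  (s.length : Int) - maxCompressed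

-- ===== PORT B =====
-- inner while: k counts the leading chunks equal to head (k = countRun + 1)
def countRun (head : List Char) (cs : List (List Char)) : Nat :=
  (cs.takeWhile (fun c => c == head)).length

-- outer while of B: peel one run per step, add its compressed length
def altLoop (cs : List (List Char)) (total : Int) : Int :=
  match cs with
  | [] => total
  | head :: rest =>
    let m := countRun head rest
    altLoop (rest.drop m)
      (total + (head.length : Int) + (if ((m : Int) + 1) > 1 then dg ((m : Int) + 1) else 0))
termination_by cs.length
decreasing_by simp

def solution_alt (string : String) : Int :=
  let s := string.toList
  let n : Int := (s.length : Int)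
  (PySem.List.pyRange 1 (PySem.Int.floordiv n 2 + 1) 1).foldl
    (fun best size => min best (altLoop (pyChunks s size) 0)) n

-- ===== PRECONDITION & SPEC =====
def Spec_solution (string : String) (out : Int) : Prop := out = solution_alt string
instance (string : String) (out : Int) : Decidable (Spec_solution string out) := by
  unfold Spec_solution; infer_instance

-- ===== CLAIM (what is proved, stated in full; the proofs are below) =====
def Claim_equal_solution : Prop := ∀ (string : String), Dom_solution string → Spec_solution string (solution string)

-- ===== LEMMAS AND PROOFS =====

-- total length (as Int) of a list of chunks
def sumLenI (cs : List (List Char)) : Int := (cs.map (fun c => (c.length : Int))).sum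

-- A's savings restarted at the head of a run (temp = head, counters fresh)
def tailSav : List (List Char) → Int
  | [] => 0
  | c :: t => finishA (t.foldl stepA (some c, (0 : Int), (0 : Int), false))

theorem pyRange_pos_nil (a b s : Int) (hs : 0 < s) (h : b ≤ a) :
    PySem.List.pyRange a b s = [] := by
  rw [PySem.List.pyRange_of_pos a b hs, if_neg (by omega)]
  simp

theorem pyRange_pos_cons (a b s : Int) (hs : 0 < s) (h : a < b) :
    PySem.List.pyRange a b s = a :: PySem.List.pyRange (a + s) b s := by
  rw [PySem.List.pyRange_of_pos a b hs, PySem.List.pyRange_of_pos (a + s) b hs, if_pos h]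
  by_cases hb : a + s < b
  · rw [if_pos hb]
    have h1 : (b - a + s - 1) / s = (b - (a + s) + s - 1) / s + 1 := by
      have := Int.add_mul_ediv_right (b - (a + s) + s - 1) 1 (ne_of_gt hs)
      rw [show b - a + s - 1 = b - (a + s) + s - 1 + 1 * s by ring, this]
    have h2 : 0 ≤ (b - (a + s) + s - 1) / s := Int.ediv_nonneg (by omega) (by omega)
    have h3 : ((b - a + s - 1) / s).toNat = ((b - (a + s) + s - 1) / s).toNat + 1 := by omega
    rw [h3, List.range_succ_eq_map]
    simp [List.map_map, Function.comp]
    intro k _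
    ring
  · rw [if_neg hb]
    have h0 : 0 ≤ b - a - 1 := by omega
    have h1 : b - a - 1 < s := by omega
    have h2 : (b - a + s - 1) / s = 1 := by
      rw [show b - a + s - 1 = (b - a - 1) + 1 * s by ring,
        Int.add_mul_ediv_right _ 1 (ne_of_gt hs), Int.ediv_eq_zero_of_lt h0 h1]
      norm_num
    rw [h2]
    simp

-- the i-sized chunks of xs starting at position a partition xs.drop a
theorem sum_len_chunks (i : Int) (hi : 0 < i) (N : Nat) :
    ∀ (xs : List Char) (a : Nat), xs.length - a ≤ N →
    ((PySem.List.pyRange (a : Int) (xs.length : Int) i).map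
        (fun j => (PySem.List.slice xs (some j) (some (j + i))).length)).sum
      = xs.length - a := by
  induction N with
  | zero =>
    intro xs a hN
    rw [pyRange_pos_nil _ _ _ hi (by omega)]
    simp
    omega
  | succ N ih =>
    intro xs a hN
    by_cases ha : a < xs.length
    · rw [pyRange_pos_cons _ _ _ hi (by exact_mod_cast ha)]
      have h1 : ((a : Int) + i) = ((a + i.toNat : Nat) : Int) := by push_cast; omega
      rw [List.map_cons, List.sum_cons, PySem.List.length_slice, h1,
        PySem.List.clampIdx_natCast, PySem.List.clampIdx_natCast,
        ih xs (a + i.toNat) (by omega)]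
      omega
    · rw [pyRange_pos_nil _ _ _ hi (by exact_mod_cast Int.ofNat_le.mpr (by omega) : (xs.length : Int) ≤ (a : Int))]
      simp
      omega

theorem altLoop_shift (N : Nat) : ∀ (cs : List (List Char)), cs.length ≤ N →
    ∀ (t : Int), altLoop cs t = t + altLoop cs 0 := by
  induction N with
  | zero =>
    intro cs hcs t
    have : cs = [] := by cases cs <;> simp_all
    subst this
    simp [altLoop]
  | succ N ih =>
    intro cs hcs t
    match cs with
    | [] => simp [altLoop]
    | head :: rest =>
      rw [altLoop, altLoop]
      have hlen : (rest.drop (countRun head rest)).length ≤ N := by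
        simp at hcs ⊢; omega
      rw [ih _ hlen]
      conv_rhs => rw [ih _ hlen]
      ring

-- A's inner loop through the rest of a run and onwards, fully characterised
theorem foldA_run (cs : List (List Char)) :
    ∀ (h : List Char) (j : Nat) (cnt : Int),
    finishA (cs.foldl stepA (some h, cnt, (j : Int), decide (0 < j)))
      = cnt + (countRun h cs : Int) * (h.length : Int)
        - (if 0 < j + countRun h cs then dg ((j : Int) + (countRun h cs : Int) + 1) else 0)
        + tailSav (cs.drop (countRun h cs)) := by
  induction cs with
  | nil =>
    intro h j cnt
    by_cases hj : 0 < j <;>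
      simp [finishA, countRun, tailSav, hj]
  | cons c t ih =>
    intro h j cnt
    by_cases hc : c = h
    · subst hc
      have hcr : countRun c (c :: t) = countRun c t + 1 := by
        simp [countRun]
      rw [List.foldl_cons, hcr]
      have hstep : stepA (some c, cnt, (j : Int), decide (0 < j)) c
          = (some c, cnt + (c.length : Int), ((j + 1 : Nat) : Int), decide (0 < j + 1)) := by
        simp [stepA]
      rw [hstep, ih c (j + 1) (cnt + (c.length : Int))]
      rw [if_pos (by omega), if_pos (by omega)]
      have hdrop : (c :: t).drop (countRun c t + 1) = t.drop (countRun c t) := by simp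
      rw [hdrop]
      push_cast
      ring
    · have hbeq : ((some h : Option (List Char)) == some c) = false := by
        simp
        exact fun he => hc he.symm
      have hcr : countRun h (c :: t) = 0 := by
        simp [countRun, List.takeWhile_cons]
        intro he
        exact absurd he hc
      rw [List.foldl_cons, hcr]
      have e2 := ih c 0 0
      have htail : tailSav (c :: t)
          = (countRun c t : Int) * (c.length : Int)
            - (if 0 < countRun c t then dg ((countRun c t : Int) + 1) else 0)
            + tailSav (t.drop (countRun c t)) := by
        simpa [tailSav] using e2
      by_cases hj : 0 < j
      · have hstep : stepA (some h, cnt, (j : Int), decide (0 < j)) c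
            = (some c, cnt - dg ((j : Int) + 1), ((0 : Nat) : Int), decide (0 < 0)) := by
          simp [stepA, hbeq, hj]
        rw [hstep, ih c 0 (cnt - dg ((j : Int) + 1))]
        simp only [List.drop_zero]
        rw [htail]
        simp [hj]
        by_cases hm : 0 < countRun c t <;> simp [hm] <;> ring
      · have hj0 : j = 0 := by omega
        subst hj0
        have hstep : stepA (some h, cnt, ((0 : Nat) : Int), decide (0 < 0)) c
            = (some c, cnt, ((0 : Nat) : Int), decide (0 < 0)) := by
          simp [stepA, hbeq]
        rw [hstep, ih c 0 cnt]
        simp only [List.drop_zero]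
        rw [htail]
        simp
        by_cases hm : 0 < countRun c t <;> simp [hm] <;> ring

-- peeling one run keeps the total length
theorem sumLenI_run (t : List (List Char)) (h : List Char) :
    sumLenI t = (countRun h t : Int) * (h.length : Int) + sumLenI (t.drop (countRun h t)) := by
  induction t with
  | nil => simp [countRun, sumLenI]
  | cons c t' ih =>
    by_cases hc : c = h
    · subst hc
      have hcr : countRun c (c :: t') = countRun c t' + 1 := by
        simp [countRun]
      rw [hcr]
      have : sumLenI (c :: t') = (c.length : Int) + sumLenI t' := by simp [sumLenI]
      rw [this, ih]
      have hdrop : (c :: t').drop (countRun c t' + 1) = t'.drop (countRun c t') := by simp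
      rw [hdrop]
      push_cast
      ring
    · have hcr : countRun h (c :: t') = 0 := by
        simp [countRun, List.takeWhile_cons]
        intro he
        exact absurd he hc
      rw [hcr]
      simp

-- B's compressed length = total length − A's savings
theorem altLoop_eq (N : Nat) : ∀ (cs : List (List Char)), cs.length ≤ N →
    altLoop cs 0 = sumLenI cs - tailSav cs := by
  induction N with
  | zero =>
    intro cs hcs
    have : cs = [] := by cases cs <;> simp_all
    subst this
    simp [altLoop, sumLenI, tailSav]
  | succ N ih =>
    intro cs hcs
    match cs with
    | [] => simp [altLoop, sumLenI, tailSav]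
    | head :: rest =>
      rw [altLoop]
      have hlen : (rest.drop (countRun head rest)).length ≤ N := by
        simp at hcs ⊢; omega
      rw [altLoop_shift N _ hlen, ih _ hlen]
      have htail : tailSav (head :: rest)
          = (countRun head rest : Int) * (head.length : Int)
            - (if 0 < countRun head rest then dg ((countRun head rest : Int) + 1) else 0)
            + tailSav (rest.drop (countRun head rest)) := by
        simpa [tailSav] using foldA_run rest head 0 0
      have hsum : sumLenI (head :: rest)
          = (head.length : Int) + ((countRun head rest : Int) * (head.length : Int)
            + sumLenI (rest.drop (countRun head rest))) := by
        simp [sumLenI]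
        have := sumLenI_run rest head
        simp [sumLenI] at this
        rw [this]
      rw [htail, hsum]
      by_cases hm : 0 < countRun head rest
      · rw [if_pos hm, if_pos (by exact_mod_cast by omega : (1 : Int) < (countRun head rest : Int) + 1)]
        ring
      · rw [if_neg hm, if_neg (by
          have h0 : countRun head rest = 0 := by omega
          rw [h0]; norm_num)]
        ring

theorem savA_eq_tailSav (cs : List (List Char)) :
    finishA (cs.foldl stepA (none, (0 : Int), (0 : Int), false)) = tailSav cs := by
  cases cs with
  | nil => simp [finishA, tailSav]
  | cons c t => simp [List.foldl_cons, stepA, tailSav]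

-- min over (n − x) is n − max over x
theorem foldl_min_sub_max (n : Int) (f : Int → Int) (l : List Int) :
    ∀ (acc : Int), l.foldl (fun b i => min b (n - f i)) (n - acc)
      = n - l.foldl (fun m i => max m (f i)) acc := by
  induction l with
  | nil => intro acc; rfl
  | cons x t ih =>
    intro acc
    have : min (n - acc) (n - f x) = n - max acc (f x) := by omega
    simpa [this] using ih (max acc (f x))

-- Int-valued chunk-length sum is the cast of the Nat-valued one
theorem sumLenI_cast (cs : List (List Char)) :
    sumLenI cs = ((cs.map List.length).sum : Int) := by
  induction cs with
  | nil => simp [sumLenI]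
  | cons c t ih => simp [sumLenI] at *; omega

-- the compressed length B computes for chunk size i is n minus the savings A computes
theorem per_size (s : List Char) (i : Int) (hi : 0 < i) :
    altLoop (pyChunks s i) 0
      = (s.length : Int)
        - finishA ((pyChunks s i).foldl stepA (none, (0 : Int), (0 : Int), false)) := by
  rw [altLoop_eq (pyChunks s i).length _ le_rfl, savA_eq_tailSav]
  have hsum : sumLenI (pyChunks s i) = (s.length : Int) := by
    rw [sumLenI_cast]
    unfold pyChunks
    have h0 := sum_len_chunks i hi s.length s 0 (by omega)
    simp only [Nat.cast_zero, Nat.sub_zero] at h0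
    rw [List.map_map]
    simp only [Function.comp_def]
    rw [h0]
  rw [hsum]

-- values of A's results dict, in insertion order
theorem values_results (l : List Int) (hnd : l.Nodup) (f : Int → Int) :
    PySem.Dict.values (l.foldl (fun res i => res.insert i (f i))
      (PySem.Dict.empty : PySem.Dict Int Int)) = l.map f := by
  have hitems := PySem.Dict.items_foldl_insert_fresh l (fun a : Int => a) f
      (PySem.Dict.empty : PySem.Dict Int Int) (by intro a _; simp) (by simpa using hnd)
  dsimp only at hitems
  simp only [PySem.Dict.values]
  rw [hitems]
  simp [PySem.Dict.empty, Function.comp]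

-- ===== VERDICT (by name: the statement is the Claim_ definition above) =====
theorem solution_spec : Claim_equal_solution := by
  unfold Claim_equal_solution
  intro string _
  unfold Spec_solution
  simp only [solution, solution_alt]
  rw [values_results _ (PySem.List.nodup_pyRange_one 1 _)]
  rw [List.foldl_map]
  have hcongr := PySem.List.foldl_congr_mem
    (l := PySem.List.pyRange 1 (PySem.Int.floordiv (string.toList.length : Int) 2 + 1) 1)
    (f := fun best size => min best (altLoop (pyChunks string.toList size) 0))
    (g := fun best size => min best ((string.toList.length : Int)
      - finishA ((pyChunks string.toList size).foldl stepA (none, (0 : Int), (0 : Int), false))))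
    (init := (string.toList.length : Int))
    (by
      intro acc x hx
      have hx1 : 1 ≤ x := (PySem.List.mem_pyRange_one.mp hx).1
      dsimp only
      rw [per_size string.toList x (by omega)])
  rw [hcongr]
  have := foldl_min_sub_max (string.toList.length : Int)
    (fun i => finishA ((pyChunks string.toList i).foldl stepA (none, (0 : Int), (0 : Int), false)))
    (PySem.List.pyRange 1 (PySem.Int.floordiv (string.toList.length : Int) 2 + 1) 1) 0
  rw [sub_zero] at this
  rw [this]
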